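-- pv_equiv track=rewrite | github.com/Avicii4/python-learning | leetcode-recommendations/stage1/1002-FindCommonCharacters.py | common_chars_1
-- ===== SOURCE A (Python) =====
-- from typing import List
-- from collections import Counter
--
-- def common_chars_1(words: List[str]) -> List[str]:
--     if len(words) == 1:
--         return list(words[0])
--     counter_list, res = [], []
--     for word in words:
--         counter_list.append(Counter(word))
--     for ch in counter_list[0]:
--         ch_min = counter_list[0][ch]
--         for i in range(1, len(counter_list)):
--             if ch not in counter_list[i]:
--                 break
--             elif counter_list[i][ch] < ch_min:
--                 ch_min = counter_list[i][ch]
--         else: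
--             for i in range(ch_min):
--                 res.append(ch)
--     return res
-- ===== SOURCE B (Python) =====
-- from typing import List
-- from collections import Counter
--
-- def common_chars_1(words: List[str]) -> List[str]:
--     if len(words) == 1:
--         return list(words[0])
--     common = Counter(words[0])
--     for w in words[1:]:
--         common &= Counter(w)
--     return list(common.elements())
-- ===== Notes on version B (the rewrite author's own statement) =====
-- stated objective: idiomatic
-- what changed: B folds a running Counter intersection (common &= Counter(w)) over the words and returns its elements(), instead of A's per-character scan of the first word's counts across a prebuilt list of all counters with break/else.
import Mathlib
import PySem

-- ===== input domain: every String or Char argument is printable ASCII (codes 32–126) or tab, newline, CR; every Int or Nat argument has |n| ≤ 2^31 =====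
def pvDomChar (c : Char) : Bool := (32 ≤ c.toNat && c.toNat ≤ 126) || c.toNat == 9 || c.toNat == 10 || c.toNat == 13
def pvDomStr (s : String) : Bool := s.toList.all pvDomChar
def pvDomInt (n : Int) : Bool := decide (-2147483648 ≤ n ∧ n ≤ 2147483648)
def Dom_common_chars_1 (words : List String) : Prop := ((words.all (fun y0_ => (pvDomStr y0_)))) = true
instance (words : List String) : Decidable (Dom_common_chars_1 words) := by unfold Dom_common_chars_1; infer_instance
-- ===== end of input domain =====

-- B replaces A's per-character scan of the first word's counts across all counters by a single fold of Counter intersection over the words; objective: idiomatic.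

-- ===== PORT A =====
-- inner 'for i in range(1, len(counter_list))' with break/else: none = break (ch missing), some m = loop completed with min m
def commonChars1Scan (cs : List (PySem.Dict Char Int)) (ch : Char) (m : Int) : Option Int :=
  match cs with
  | [] => some m
  | c :: rest =>
      if c.contains ch = false then none
      else if c.getD ch 0 < m then commonChars1Scan rest ch (c.getD ch 0)
      else commonChars1Scan rest ch m

def common_chars_1 (words : List String) : List String :=
  if words.length = 1 then ((words.headD "").toList).map (fun c => String.ofList [c])
  else
    match words with
    | [] => []   -- Python raises IndexError (counter_list[0]); excluded by Pre_common_chars_1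
    | w0 :: rest =>
      let c0 := PySem.Dict.counter w0.toList
      let cs := rest.map (fun w => PySem.Dict.counter w.toList)
      c0.keys.foldl (fun res ch =>
        match commonChars1Scan cs ch (c0.getD ch 0) with
        | none => res
        | some m => (PySem.List.pyRange 0 m 1).foldl (fun r _ => r ++ [String.ofList [ch]]) res) []

-- ===== PORT B =====
-- Counter.__and__: keys of the left counter in order, value the minimum count, dropping non-positive counts
def commonChars1Inter (d1 d2 : PySem.Dict Char Int) : PySem.Dict Char Int :=
  d1.items.foldl (fun r p =>
    let n := min p.2 (d2.getD p.1 0)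
    if 0 < n then r.insert p.1 n else r) PySem.Dict.empty

-- Counter.elements(): each key repeated by its count, in insertion order
def commonChars1Elements (d : PySem.Dict Char Int) : List String :=
  d.items.foldl (fun r p => r ++ List.replicate p.2.toNat (String.ofList [p.1])) []

def common_chars_1_alt (words : List String) : List String :=
  if words.length = 1 then ((words.headD "").toList).map (fun c => String.ofList [c])
  else
    match words with
    | [] => []   -- Python raises IndexError (Counter(words[0]) via words[0]); excluded by Pre_common_chars_1
    | w0 :: rest =>
      commonChars1Elements
        (rest.foldl (fun com w => commonChars1Inter com (PySem.Dict.counter w.toList))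
          (PySem.Dict.counter w0.toList))

-- ===== PRECONDITION & SPEC =====
-- Pre_ excludes only the empty list, on which both A and B raise IndexError.
def Pre_common_chars_1 (words : List String) : Prop := words ≠ []
instance (words : List String) : Decidable (Pre_common_chars_1 words) := by unfold Pre_common_chars_1; infer_instance
def pvWitness_common_chars_1 : List String := ["bella", "label", "roller"]

def Spec_common_chars_1 (words : List String) (out : List String) : Prop := out = common_chars_1_alt words
instance (words : List String) (out : List String) : Decidable (Spec_common_chars_1 words out) := by unfold Spec_common_chars_1; infer_instance

-- ===== CLAIM (what is proved, stated in full; the proofs are below) =====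
def Claim_equal_common_chars_1 : Prop := ∀ (words : List String), Dom_common_chars_1 words → Pre_common_chars_1 words → Spec_common_chars_1 words (common_chars_1 words)

-- ===== LEMMAS AND PROOFS =====

def interStep (c : PySem.Dict Char Int) (p : Char × Int) : Option (Char × Int) :=
  if 0 < min p.2 (c.getD p.1 0) then some (p.1, min p.2 (c.getD p.1 0)) else none

lemma inter_foldl_items (c : PySem.Dict Char Int) (l : List (Char × Int)) (r : PySem.Dict Char Int)
    (h : ∀ p ∈ l, r.contains p.1 = false) (hnd : (l.map Prod.fst).Nodup) :
    (l.foldl (fun r p =>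
      let n := min p.2 (c.getD p.1 0)
      if 0 < n then r.insert p.1 n else r) r).items
    = r.items ++ l.filterMap (interStep c) := by
  induction l generalizing r with
  | nil => simp
  | cons p l ih =>
    simp only [List.foldl_cons, List.filterMap_cons]
    simp only [List.map_cons, List.nodup_cons] at hnd
    by_cases hn : 0 < min p.2 (c.getD p.1 0)
    · rw [if_pos hn]
      have hfresh : r.contains p.1 = false := h p (by simp)
      have h' : ∀ q ∈ l, (r.insert p.1 (min p.2 (c.getD p.1 0))).contains q.1 = false := by
        intro q hq
        rw [PySem.Dict.contains_insert]
        have : q.1 ≠ p.1 := by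
          intro he; exact hnd.1 (he ▸ List.mem_map_of_mem hq)
        simp [this, h q (by simp [hq])]
      rw [ih _ h' hnd.2, PySem.Dict.items_insert_of_not_contains _ _ hfresh]
      simp only [interStep]
      rw [if_pos hn]
      simp
    · rw [if_neg hn]
      rw [ih _ (fun q hq => h q (by simp [hq])) hnd.2]
      simp only [interStep]
      rw [if_neg hn]

lemma inter_items (d c : PySem.Dict Char Int) (hnd : d.keys.Nodup) :
    (commonChars1Inter d c).items = d.items.filterMap (interStep c) := by
  have := inter_foldl_items c d.items PySem.Dict.empty (by simp) hnd
  simpa [commonChars1Inter] using this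

lemma filterMap_keep_fst (f : Char × Int → Option (Char × Int))
    (hf : ∀ p q, f p = some q → q.1 = p.1) (l : List (Char × Int)) :
    List.Sublist ((l.filterMap f).map Prod.fst) (l.map Prod.fst) := by
  induction l with
  | nil => simp
  | cons p l ih =>
    simp only [List.filterMap_cons, List.map_cons]
    cases hfp : f p with
    | none => exact ih.cons _
    | some q =>
      simp only [List.map_cons, hf p q hfp]
      exact ih.cons₂ p.1

lemma inter_keys_nodup (d c : PySem.Dict Char Int) (hnd : d.keys.Nodup) :
    (commonChars1Inter d c).keys.Nodup := by
  have hk : (commonChars1Inter d c).keys = ((d.items.filterMap (interStep c)).map Prod.fst) := by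
    simp [PySem.Dict.keys, inter_items d c hnd]
  rw [hk]
  refine List.Nodup.sublist (filterMap_keep_fst _ ?_ _) hnd
  intro p q hq
  simp only [interStep] at hq
  split at hq
  · cases hq; rfl
  · cases hq

lemma inter_pos (d c : PySem.Dict Char Int) (hnd : d.keys.Nodup) :
    ∀ q ∈ (commonChars1Inter d c).items, 0 < q.2 := by
  intro q hq
  rw [inter_items d c hnd, List.mem_filterMap] at hq
  obtain ⟨p, _, hp⟩ := hq
  simp only [interStep] at hp
  split at hp
  · cases hp; omega
  · cases hp

lemma foldl_inter_scan (cs : List (PySem.Dict Char Int))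
    (hc : ∀ c ∈ cs, ∀ ch : Char, c.contains ch = true ↔ 0 < c.getD ch 0)
    (d : PySem.Dict Char Int) (hnd : d.keys.Nodup) (hpos : ∀ p ∈ d.items, 0 < p.2) :
    (cs.foldl commonChars1Inter d).items
    = d.items.filterMap (fun p => (commonChars1Scan cs p.1 p.2).map (fun m => (p.1, m))) := by
  induction cs generalizing d with
  | nil => simp [commonChars1Scan]
  | cons c cs ih =>
    rw [List.foldl_cons,
      ih (fun c' h' ch => hc c' (by simp [h']) ch) (commonChars1Inter d c)
        (inter_keys_nodup d c hnd) (inter_pos d c hnd),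
      inter_items d c hnd, List.filterMap_filterMap]
    apply List.filterMap_congr
    intro p hp
    have hp2 := hpos p hp
    have hcc := hc c (by simp) p.1
    by_cases hco : c.contains p.1 = false
    · have hg : ¬ 0 < c.getD p.1 0 := fun h => by simp [hcc.mpr h] at hco
      have : ¬ 0 < min p.2 (c.getD p.1 0) := by
        rw [lt_min_iff]; tauto
      simp [interStep, commonChars1Scan, this, hco]
    · have hco' : c.contains p.1 = true := by simpa using hco
      have hg : 0 < c.getD p.1 0 := hcc.mp hco'
      have hmin : 0 < min p.2 (c.getD p.1 0) := lt_min_iff.mpr ⟨hp2, hg⟩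
      simp only [interStep, if_pos hmin, Option.bind_some, commonChars1Scan, hco,
        Bool.true_eq_false]
      simp only [if_false]
      rw [min_def]
      by_cases hle : p.2 ≤ c.getD p.1 0
      · rw [if_pos hle, if_neg (not_lt.mpr hle)]
      · rw [if_neg hle, if_pos (lt_of_not_ge hle)]

lemma scan_pos (cs : List (PySem.Dict Char Int))
    (hc : ∀ c ∈ cs, ∀ ch : Char, c.contains ch = true ↔ 0 < c.getD ch 0)
    (ch : Char) (m : Int) (h0 : 0 < m) :
    ∀ m', commonChars1Scan cs ch m = some m' → 0 < m' := by
  induction cs generalizing m with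
  | nil => intro m' h; simp [commonChars1Scan] at h; omega
  | cons c cs ih =>
    intro m' h
    simp only [commonChars1Scan] at h
    split at h
    · cases h
    · rename_i hco
      have hg : 0 < c.getD ch 0 := (hc c (by simp) ch).mp (by simpa using hco)
      split at h
      · exact ih (fun c' h' => hc c' (by simp [h'])) _ hg m' h
      · exact ih (fun c' h' => hc c' (by simp [h'])) _ h0 m' h

lemma foldl_const_append (l : List Int) (s : String) (res : List String) :
    l.foldl (fun r _ => r ++ [s]) res = res ++ List.replicate l.length s := by
  induction l generalizing res with
  | nil => simp
  | cons x l ih =>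
    rw [List.foldl_cons, ih, List.length_cons, List.replicate_succ]
    simp

lemma append_loop (m : Int) (hm : 0 ≤ m) (s : String) (res : List String) :
    (PySem.List.pyRange 0 m 1).foldl (fun r _ => r ++ [s]) res = res ++ List.replicate m.toNat s := by
  obtain ⟨n, rfl⟩ := Int.eq_ofNat_of_zero_le hm
  rw [PySem.List.pyRange_zero_natCast, foldl_const_append]
  simp

lemma flatMap_filterMap_scan (cs : List (PySem.Dict Char Int)) (l : List (Char × Int)) :
    (l.filterMap (fun p => (commonChars1Scan cs p.1 p.2).map (fun m => (p.1, m)))).flatMap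
      (fun q => List.replicate q.2.toNat (String.ofList [q.1]))
    = l.flatMap (fun p => match commonChars1Scan cs p.1 p.2 with
        | none => []
        | some m => List.replicate m.toNat (String.ofList [p.1])) := by
  induction l with
  | nil => simp
  | cons p l ih =>
    simp only [List.filterMap_cons, List.flatMap_cons]
    cases commonChars1Scan cs p.1 p.2 <;> simp [ih]

theorem main_eq (words : List String) (hpre : words ≠ []) :
    common_chars_1 words = common_chars_1_alt words := by
  by_cases h1 : words.length = 1
  · simp [common_chars_1, common_chars_1_alt, h1]
  · match words with
    | [] => exact absurd rfl hpre
    | w0 :: rest =>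
      simp only [common_chars_1, common_chars_1_alt, if_neg h1]
      set c0 := PySem.Dict.counter w0.toList with hc0
      set cs := rest.map (fun w => PySem.Dict.counter w.toList) with hcs
      have hc : ∀ c ∈ cs, ∀ ch : Char, c.contains ch = true ↔ 0 < c.getD ch 0 := by
        intro c hcm ch
        rw [hcs, List.mem_map] at hcm
        obtain ⟨w, _, rfl⟩ := hcm
        rw [PySem.Dict.contains_counter, PySem.Dict.getD_counter]
        simp [List.count_pos_iff]
      have hnd0 : c0.keys.Nodup := PySem.Dict.nodup_keys_counter w0.toList
      have hpos0 : ∀ p ∈ c0.items, 0 < p.2 := by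
        intro p hp
        rw [hc0, PySem.Dict.items_counter, List.mem_map] at hp
        obtain ⟨k, hk, rfl⟩ := hp
        simpa [List.count_pos_iff] using (PySem.Set.mem_ofList w0.toList k).mp hk
      -- rewrite B's dict items
      have hB : commonChars1Elements (rest.foldl (fun com w => commonChars1Inter com (PySem.Dict.counter w.toList)) c0)
          = (c0.items.filterMap (fun p => (commonChars1Scan cs p.1 p.2).map (fun m => (p.1, m)))).foldl
              (fun r p => r ++ List.replicate p.2.toNat (String.ofList [p.1])) [] := by
        have hfold : rest.foldl (fun com w => commonChars1Inter com (PySem.Dict.counter w.toList)) c0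
            = cs.foldl commonChars1Inter c0 := by
          rw [hcs, List.foldl_map]
        rw [commonChars1Elements, hfold, foldl_inter_scan cs hc c0 hnd0 hpos0]
      rw [hB]
      -- rewrite A's fold over keys into a fold over items
      have hkeys : c0.keys = c0.items.map Prod.fst := rfl
      rw [hkeys, List.foldl_map]
      rw [PySem.List.foldl_congr_mem c0.items _
        (fun res p => res ++ (match commonChars1Scan cs p.1 p.2 with
          | none => []
          | some m => List.replicate m.toNat (String.ofList [p.1]))) []
        ?_]
      · rw [PySem.List.foldl_append_eq_flatMap, PySem.List.foldl_append_eq_flatMap]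
        simp only [List.nil_append]
        exact (flatMap_filterMap_scan cs c0.items).symm
      · intro res p hp
        have hget : c0.getD p.1 0 = p.2 :=
          PySem.Dict.getD_of_mem_items c0 (by simpa using hp) hnd0 0
        rw [hget]
        cases hscan : commonChars1Scan cs p.1 p.2 with
        | none => simp [hscan]
        | some m =>
          have hm : 0 < m := scan_pos cs hc p.1 p.2 (hpos0 p hp) m hscan
          simp only [hscan]
          exact append_loop m (le_of_lt hm) (String.ofList [p.1]) res

-- ===== VERDICT (by name: the statement is the Claim_ definition above) =====
theorem common_chars_1_spec : Claim_equal_common_chars_1 := by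
  intro words _ hpre
  exact main_eq words hpre
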